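-- pv_equiv track=rewrite | github.com/parkminsuyang/CodingTest_Python | Python/백준/Bronze/2775. 부녀회장이 될테야/부녀회장이 될테야.py | live
-- ===== SOURCE A (Python) =====
-- def live(k,n):
--
--     if n==1:
--         return 1
--
--     else:
--         people = [[0]*(n+1) for _ in range(k+1)]
--         people[0][1]=1
--         for w in range(2,n+1):
--             people[0][w]=people[0][w-1]+1
--
--         for j in range(1,k+1):
--             for o in range(1,n+1):
--                 people[j][o]=people[j-1][o]+people[j][o-1]
--
--
--         return people[k][n]
-- ===== SOURCE B (Python) =====
-- def live(k, n):
--     # closed form: floor k, room n holds C(n+k, n-1) people;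
--     # computed by one multiplicative product loop with exact integer division
--     r = 1
--     for i in range(1, n):
--         r = r * (k + 1 + i) // i
--     return r
-- ===== Notes on version B (the rewrite author's own statement) =====
-- stated objective: faster
-- what changed: Replaces the O(k*n) dynamic-programming table with the closed form C(n+k, n-1), computed by a single multiplicative loop of n-1 exact-division steps.
import Mathlib
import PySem

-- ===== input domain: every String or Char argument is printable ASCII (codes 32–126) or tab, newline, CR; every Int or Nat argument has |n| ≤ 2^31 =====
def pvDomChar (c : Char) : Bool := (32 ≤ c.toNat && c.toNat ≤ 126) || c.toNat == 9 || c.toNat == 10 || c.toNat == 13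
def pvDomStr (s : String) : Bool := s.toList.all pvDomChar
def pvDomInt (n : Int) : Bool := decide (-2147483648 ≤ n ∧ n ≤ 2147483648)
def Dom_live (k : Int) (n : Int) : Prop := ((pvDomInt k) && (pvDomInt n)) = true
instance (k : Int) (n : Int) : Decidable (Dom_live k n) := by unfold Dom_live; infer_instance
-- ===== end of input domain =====

-- B changes the algorithm: A fills a (k+1)×(n+1) DP table; B computes the closed form
-- C(n+k, n-1) with a single product loop (one exact integer division per step).

-- ===== PORT A =====
-- people[i][o] read (indices are nonnegative and in range on Pre_)
def pvGet2 (p : List (List Int)) (i o : Int) : Int :=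
  (p.getD i.toNat []).getD o.toNat 0

-- people[i][o] = v write
def pvSet2 (p : List (List Int)) (i o : Int) (v : Int) : List (List Int) :=
  p.set i.toNat ((p.getD i.toNat []).set o.toNat v)

def live (k : Int) (n : Int) : Int :=
  if n == 1 then 1
  else
    let p0 : List (List Int) :=
      (PySem.List.pyRange 0 (k+1) 1).map (fun _ => List.replicate (n+1).toNat 0)
    let p1 := pvSet2 p0 0 1 1
    let p2 := (PySem.List.pyRange 2 (n+1) 1).foldl
      (fun p w => pvSet2 p 0 w (pvGet2 p 0 (w-1) + 1)) p1
    let p3 := (PySem.List.pyRange 1 (k+1) 1).foldl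
      (fun p j => (PySem.List.pyRange 1 (n+1) 1).foldl
        (fun q o => pvSet2 q j o (pvGet2 q (j-1) o + pvGet2 q j (o-1))) p) p2
    pvGet2 p3 k n

-- ===== PORT B =====
def live_alt (k : Int) (n : Int) : Int :=
  (PySem.List.pyRange 1 n 1).foldl
    (fun r i => PySem.Int.floordiv (r * (k + 1 + i)) i) 1

-- ===== PRECONDITION & SPEC =====
-- Pre_ excludes exactly the inputs where A raises IndexError: n ≠ 1 together with
-- (k < 0 or n < 2), where A indexes people[0][1] into an empty/short table.
def Pre_live (k : Int) (n : Int) : Prop := n = 1 ∨ (0 ≤ k ∧ 2 ≤ n)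
instance (k : Int) (n : Int) : Decidable (Pre_live k n) := by unfold Pre_live; infer_instance
def pvWitness_live : Int × Int := (2, 3)

def Spec_live (k : Int) (n : Int) (out : Int) : Prop := out = live_alt k n
instance (k : Int) (n : Int) (out : Int) : Decidable (Spec_live k n out) := by
  unfold Spec_live; infer_instance

-- ===== CLAIM (what is proved, stated in full; the proofs are below) =====
def Claim_equal_live : Prop := ∀ (k : Int) (n : Int), Dom_live k n → Pre_live k n → Spec_live k n (live k n)

-- ===== LEMMAS AND PROOFS =====

-- the intended table entry: people[j][o] = C(j+o, o-1), with column 0 equal to 0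
def pvE (j : Nat) (o : Nat) : Int :=
  match o with
  | 0 => 0
  | Nat.succ p => ((j + p + 1).choose p : Int)

-- abstract (K+1)×(N+1) table built from an entry function
def pvMk2 (K N : Nat) (f : Nat → Nat → Int) : List (List Int) :=
  (List.range (K+1)).map (fun i => (List.range (N+1)).map (f i))

theorem pvMk2_get (K N : Nat) (f : Nat → Nat → Int) (i o : Int)
    (hi : i.toNat < K+1) (ho : o.toNat < N+1) :
    pvGet2 (pvMk2 K N f) i o = f i.toNat o.toNat := by
  simp [pvGet2, pvMk2, List.getD_eq_getElem?_getD, List.getElem?_map,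
    List.getElem?_range, hi, ho]

theorem pvMk2_set (K N : Nat) (f : Nat → Nat → Int) (i o : Int) (v : Int)
    (hi : i.toNat < K+1) (ho : o.toNat < N+1) :
    pvSet2 (pvMk2 K N f) i o v
      = pvMk2 K N (fun a b => if a = i.toNat ∧ b = o.toNat then v else f a b) := by
  have hrow : (pvMk2 K N f).getD i.toNat [] = (List.range (N+1)).map (f i.toNat) := by
    simp [pvMk2, List.getD_eq_getElem?_getD, hi]
  unfold pvSet2
  rw [hrow]
  have hrow' : ((List.range (N+1)).map (f i.toNat)).set o.toNat v
      = (List.range (N+1)).map (fun b => if b = o.toNat then v else f i.toNat b) := by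
    apply List.ext_getElem
    · simp
    · intro b hb1 hb2
      rw [List.getElem_set]
      simp only [List.getElem_map, List.getElem_range]
      by_cases h : o.toNat = b
      · subst h; simp
      · rw [if_neg h, if_neg (fun hh => h hh.symm)]
  rw [hrow']
  unfold pvMk2
  apply List.ext_getElem
  · simp
  · intro a h1 h2
    rw [List.getElem_set]
    simp only [List.getElem_map, List.getElem_range]
    by_cases hai : i.toNat = a
    · subst hai
      rw [if_pos rfl]
      apply List.map_congr_left
      intro b _
      simp
    · rw [if_neg hai]
      apply List.map_congr_left
      intro b _
      have : ¬ (a = i.toNat ∧ b = o.toNat) := fun h => hai h.1.symm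
      rw [if_neg this]

theorem pvMk2_congr (K N : Nat) (f g : Nat → Nat → Int)
    (h : ∀ a b, a < K+1 → b < N+1 → f a b = g a b) : pvMk2 K N f = pvMk2 K N g := by
  unfold pvMk2
  apply List.ext_getElem
  · simp
  · intro a h1 h2
    simp only [List.getElem_map, List.getElem_range]
    apply List.ext_getElem
    · simp
    · intro b hb1 hb2
      simp only [List.getElem_map, List.getElem_range]
      simp only [List.length_map, List.length_range] at h1 hb1
      exact h a b h1 hb1

-- row-0 partial state after the first loop has run through w = 2..m
def pvG (N : Nat) (m : Nat) (a b : Nat) : Int :=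
  if a = 0 ∧ 1 ≤ b ∧ b ≤ m then (b : Int) else 0

theorem pv_phase1 (K N : Nat) (hN : 2 ≤ N) (m : Nat) (h1 : 1 ≤ m) (hm : m ≤ N) :
    (PySem.List.pyRange 2 ((m : Int)+1) 1).foldl
        (fun p w => pvSet2 p 0 w (pvGet2 p 0 (w-1) + 1)) (pvMk2 K N (pvG N 1))
      = pvMk2 K N (pvG N m) := by
  induction m with
  | zero => omega
  | succ m ih =>
    by_cases hm1 : m = 0
    · subst hm1
      have : ((1 : Nat) : Int) + 1 = 2 := by norm_num
      rw [this, PySem.List.pyRange_one_eq_nil (by norm_num)]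
      simp
    · have hmm : 1 ≤ m := by omega
      have hmN : m ≤ N := by omega
      have hsplit : PySem.List.pyRange 2 (((m+1 : Nat) : Int)+1) 1
          = PySem.List.pyRange 2 ((m : Int)+1) 1 ++ [((m : Int)+1)] := by
        have := PySem.List.pyRange_one_succ_right (a := 2) (b := (m : Int)+1) (by omega)
        rw [← this]; push_cast; ring_nf
      rw [hsplit, List.foldl_append, ih hmm hmN]
      simp only [List.foldl_cons, List.foldl_nil]
      have hto : ((m : Int)+1).toNat = m+1 := by omega
      have hto' : (((m : Int)+1)-1).toNat = m := by omega
      have hget : pvGet2 (pvMk2 K N (pvG N m)) 0 (((m : Int)+1)-1) = (m : Int) := by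
        rw [pvMk2_get K N _ 0 (((m : Int)+1)-1) (by omega) (by omega)]
        simp [pvG, hto', hmm]
      rw [hget, pvMk2_set K N _ 0 ((m : Int)+1) _ (by omega) (by omega)]
      apply pvMk2_congr
      intro a b ha hb
      simp only [Int.toNat_zero, hto]
      by_cases hc : a = 0 ∧ b = m+1
      · rw [if_pos hc]
        simp only [pvG, if_pos (show a = 0 ∧ 1 ≤ b ∧ b ≤ m+1 from by omega)]
        omega
      · rw [if_neg hc]
        simp only [pvG]
        by_cases hc2 : a = 0 ∧ 1 ≤ b ∧ b ≤ m
        · rw [if_pos hc2, if_pos (show a = 0 ∧ 1 ≤ b ∧ b ≤ m+1 from by omega)]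
        · rw [if_neg hc2, if_neg (by omega)]

-- Pascal's rule for the table entry
theorem pvE_pascal (t m : Nat) : pvE (t+1) (m+1) = pvE t (m+1) + pvE (t+1) m := by
  cases m with
  | zero => simp [pvE]
  | succ o =>
    have h : (t+1+(o+1)+1).choose (o+1) = (t+(o+1)+1).choose (o+1) + (t+1+o+1).choose o := by
      rw [show t+1+(o+1)+1 = t+o+2+1 from by omega, show t+(o+1)+1 = t+o+2 from by omega,
          show t+1+o+1 = t+o+2 from by omega]
      have h2 := Nat.choose_succ_succ (t+o+2) o
      simp only [Nat.succ_eq_add_one] at h2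
      omega
    show ((t+1+(o+1)+1).choose (o+1) : Int)
        = ((t+(o+1)+1).choose (o+1) : Int) + ((t+1+o+1).choose o : Int)
    exact_mod_cast h

-- the inner loop of the second phase: fills row t+1 up to column m
theorem pv_inner (K N : Nat) (hN : 2 ≤ N) (t : Nat) (ht : t+1 < K+1)
    (f : Nat → Nat → Int)
    (hprev : ∀ b, b < N+1 → f t b = pvE t b) (hrow : f (t+1) 0 = 0)
    (m : Nat) (hm : m ≤ N) :
    (PySem.List.pyRange 1 ((m : Int)+1) 1).foldl
        (fun q o => pvSet2 q ((t : Int)+1) o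
          (pvGet2 q (((t : Int)+1)-1) o + pvGet2 q ((t : Int)+1) (o-1))) (pvMk2 K N f)
      = pvMk2 K N (fun a b => if a = t+1 ∧ 1 ≤ b ∧ b ≤ m then pvE (t+1) b else f a b) := by
  induction m with
  | zero =>
    rw [PySem.List.pyRange_one_eq_nil (by norm_num)]
    simp only [List.foldl_nil]
    apply pvMk2_congr; intro a b ha hb
    rw [if_neg (by omega)]
  | succ m ih =>
    have hsplit : PySem.List.pyRange 1 (((m+1 : Nat) : Int)+1) 1
        = PySem.List.pyRange 1 ((m : Int)+1) 1 ++ [((m : Int)+1)] := by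
      have := PySem.List.pyRange_one_succ_right (a := 1) (b := (m : Int)+1) (by omega)
      rw [← this]; push_cast; ring_nf
    rw [hsplit, List.foldl_append, ih (by omega)]
    simp only [List.foldl_cons, List.foldl_nil]
    have htto : ((t : Int)+1).toNat = t+1 := by omega
    have htto' : (((t : Int)+1)-1).toNat = t := by omega
    have hoto : ((m : Int)+1).toNat = m+1 := by omega
    have hoto' : ((((m : Nat) : Int)+1)-1).toNat = m := by omega
    have hget1 : pvGet2 (pvMk2 K N (fun a b => if a = t+1 ∧ 1 ≤ b ∧ b ≤ m then pvE (t+1) b else f a b)) (((t : Int)+1)-1) ((m : Int)+1) = pvE t (m+1) := by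
      rw [pvMk2_get K N (fun a b => if a = t+1 ∧ 1 ≤ b ∧ b ≤ m then pvE (t+1) b else f a b) _ _ (by omega) (by omega)]
      rw [htto', hoto]
      rw [if_neg (by omega), hprev (m+1) (by omega)]
    rw [hget1]
    have hget2 : pvGet2 (pvMk2 K N (fun a b => if a = t+1 ∧ 1 ≤ b ∧ b ≤ m then pvE (t+1) b else f a b)) ((t : Int)+1) (((m : Int)+1)-1) = pvE (t+1) m := by
      rw [pvMk2_get K N (fun a b => if a = t+1 ∧ 1 ≤ b ∧ b ≤ m then pvE (t+1) b else f a b) _ _ (by omega) (by omega)]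
      rw [htto, hoto']
      by_cases hm0 : m = 0
      · subst hm0; rw [if_neg (by omega), hrow]; rfl
      · rw [if_pos ⟨rfl, by omega, le_refl m⟩]
    rw [hget2, ← pvE_pascal t m,
      pvMk2_set K N _ _ _ _ (by omega) (by omega)]
    apply pvMk2_congr
    intro a b ha hb
    simp only [htto, hoto]
    by_cases hc : a = t+1 ∧ b = m+1
    · rw [if_pos hc, if_pos ⟨hc.1, by omega, by omega⟩, hc.2]
    · rw [if_neg hc]
      by_cases hc2 : a = t+1 ∧ 1 ≤ b ∧ b ≤ m
      · rw [if_pos hc2, if_pos ⟨hc2.1, hc2.2.1, by omega⟩]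
      · rw [if_neg hc2, if_neg (by omega)]

-- full table after the outer loop has processed rows 1..j
theorem pv_outer (K N : Nat) (hN : 2 ≤ N) (j : Nat) (hj : j ≤ K) :
    (PySem.List.pyRange 1 ((j : Int)+1) 1).foldl
        (fun p jj => (PySem.List.pyRange 1 ((N : Int)+1) 1).foldl
          (fun q o => pvSet2 q jj o (pvGet2 q (jj-1) o + pvGet2 q jj (o-1))) p)
        (pvMk2 K N (pvG N N))
      = pvMk2 K N (fun a b => if a ≤ j then pvE a b else 0) := by
  induction j with
  | zero =>
    rw [PySem.List.pyRange_one_eq_nil (a := 1) (b := ((0:Nat) : Int)+1) (by simp)]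
    simp only [List.foldl_nil]
    apply pvMk2_congr; intro a b ha hb
    by_cases ha0 : a = 0
    · subst ha0
      rw [if_pos (by omega)]
      cases b with
      | zero => simp [pvG, pvE]
      | succ p =>
        simp only [pvG, pvE]
        rw [if_pos (⟨trivial, by omega, by omega⟩ : True ∧ 1 ≤ p+1 ∧ p+1 ≤ N)]
        simp [Nat.choose_succ_self_right]
    · rw [if_neg (by omega)]
      simp [pvG, ha0]
  | succ j ih =>
    have hsplit : PySem.List.pyRange 1 (((j+1 : Nat) : Int)+1) 1
        = PySem.List.pyRange 1 ((j : Int)+1) 1 ++ [((j : Int)+1)] := by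
      have := PySem.List.pyRange_one_succ_right (a := 1) (b := (j : Int)+1) (by omega)
      rw [← this]; push_cast; ring_nf
    rw [hsplit, List.foldl_append, ih (by omega)]
    simp only [List.foldl_cons, List.foldl_nil]
    rw [pv_inner K N hN j (by omega) _ ?hprev ?hrow N (le_refl N)]
    case hprev =>
      intro b hb
      rw [if_pos (le_refl j)]
    case hrow =>
      rw [if_neg (by omega)]
    apply pvMk2_congr
    intro a b ha hb
    by_cases hc : a = j+1 ∧ 1 ≤ b ∧ b ≤ N
    · rw [if_pos hc, if_pos (by omega), hc.1]
    · rw [if_neg hc]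
      by_cases hc2 : a ≤ j
      · rw [if_pos hc2, if_pos (by omega)]
      · rw [if_neg hc2]
        by_cases hc3 : a = j+1 ∧ b = 0
        · rw [if_pos (by omega), hc3.2]; rfl
        · rw [if_neg (by omega)]

-- value of A on the main domain
theorem live_closed (K N : Nat) (hN : 2 ≤ N) :
    live (K : Int) (N : Int) = pvE K N := by
  unfold live
  rw [if_neg (by simp; omega)]
  have hp0 : (PySem.List.pyRange 0 ((K : Int)+1) 1).map
      (fun _ => List.replicate (((N : Int)+1)).toNat 0) = pvMk2 K N (fun _ _ => 0) := by
    apply List.ext_getElem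
    · simp [pvMk2, PySem.List.length_pyRange_one]
    · intro a h1 h2
      simp only [List.getElem_map, pvMk2]
      have : (((N : Int))+1).toNat = N+1 := by omega
      rw [this]
      apply List.ext_getElem <;> simp
  dsimp only
  rw [hp0]
  have hp1 : pvSet2 (pvMk2 K N (fun _ _ => 0)) 0 1 1 = pvMk2 K N (pvG N 1) := by
    rw [pvMk2_set K N _ 0 1 1 (by omega) (by omega)]
    apply pvMk2_congr
    intro a b ha hb
    simp only [pvG, Int.toNat_zero, Int.toNat_one]
    by_cases hc : a = 0 ∧ b = 1
    · rw [if_pos hc, if_pos ⟨hc.1, by omega, by omega⟩, hc.2]; rfl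
    · rw [if_neg hc, if_neg (by omega)]
  rw [hp1]
  rw [pv_phase1 K N hN N (by omega) (le_refl N), pv_outer K N hN K (le_refl K)]
  rw [pvMk2_get K N _ _ _ (by omega) (by omega)]
  simp only [Int.toNat_natCast]
  rw [if_pos (le_refl K)]

-- value of B: the product loop computes the binomial coefficient
theorem pv_bfold (k : Int) (K : Nat) (hk : k = (K : Int)) (m : Nat) :
    (PySem.List.pyRange 1 ((m : Int)+1) 1).foldl
        (fun r i => PySem.Int.floordiv (r * (k + 1 + i)) i) 1
      = ((K+1+m).choose m : Int) := by
  induction m with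
  | zero =>
    rw [PySem.List.pyRange_one_eq_nil (by norm_num)]
    simp
  | succ m ih =>
    have hsplit : PySem.List.pyRange 1 (((m+1 : Nat) : Int)+1) 1
        = PySem.List.pyRange 1 ((m : Int)+1) 1 ++ [((m : Int)+1)] := by
      have := PySem.List.pyRange_one_succ_right (a := 1) (b := (m : Int)+1) (by omega)
      rw [← this]; push_cast; ring_nf
    rw [hsplit, List.foldl_append, ih]
    simp only [List.foldl_cons, List.foldl_nil]
    have hmul : ((K+1+m).choose m : Int) * (k + 1 + ((m : Int)+1))
        = (((K+m+2).choose (m+1) * (m+1) : Nat) : Int) := by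
      have hid : (K+m+1).choose m * (K+m+2) = (K+m+2).choose (m+1) * (m+1) := by
        have h2 := Nat.add_one_mul_choose_eq (K+m+1) m
        simp only [Nat.succ_eq_add_one, show K+m+1+1 = K+m+2 from by omega] at h2
        rw [Nat.mul_comm]
        exact h2
      rw [hk, show K+1+m = K+m+1 from by omega, ← hid]
      push_cast
      ring
    rw [hmul, show ((m : Int)+1) = (((m+1 : Nat) : Int)) from by push_cast; ring]
    rw [PySem.Int.floordiv_natCast]
    rw [Nat.mul_div_cancel _ (by omega)]
    rw [show K+1+(m+1) = K+m+2 from by omega]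

-- ===== VERDICT (by name: the statement is the Claim_ definition above) =====
theorem live_spec : Claim_equal_live := by
  intro k n _ hpre
  unfold Spec_live
  rcases hpre with h1 | ⟨hk, hn⟩
  · subst h1
    unfold live live_alt
    rw [if_pos (by simp), PySem.List.pyRange_one_eq_nil (by norm_num)]
    simp
  · obtain ⟨K, hK⟩ : ∃ K : Nat, k = (K : Int) := ⟨k.toNat, by omega⟩
    obtain ⟨N, hN⟩ : ∃ N : Nat, n = (N : Int) := ⟨n.toNat, by omega⟩
    have hN2 : 2 ≤ N := by omega
    subst hK hN
    rw [live_closed K N hN2]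
    unfold live_alt
    obtain ⟨M, hM⟩ : ∃ M : Nat, N = M + 1 := ⟨N - 1, by omega⟩
    have hb : ((N : Nat) : Int) = ((M : Int)+1) := by omega
    rw [hb, pv_bfold (K : Int) K rfl M]
    subst hM
    simp [pvE, show K+M+1 = K+1+M from by omega]
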